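-- pv_equiv track=rewrite | github.com/seanwevans/ProjectEuler | 100-199/P145.py | rev_sum2
-- ===== SOURCE A (Python) =====
-- def rev_sum2(n):
-- 	rsum = ex = 0
-- 	sn = str(n)
-- 	l = len(sn) - 1
-- 	halfl = int(l/2)
-- 	for k in range(halfl+1):
-- 		rsum += (int(sn[k]) + int(sn[l-k]))*(10**(k) + 10**(l-k))
-- 	if not l%2: ex = 2 * int(sn[halfl]) * 10**(halfl)
-- 	rsum -= ex
-- 	return rsum
-- ===== SOURCE B (Python) =====
-- def rev_sum2(n):
--     m, r = n, 0
--     while m > 0: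
--         r = r * 10 + m % 10
--         m //= 10
--     return n + r
-- ===== Notes on version B (the rewrite author's own statement) =====
-- stated objective: simpler
-- what changed: B replaces A's string conversion, per-character parsing and symmetric pair-sum with positional power weights plus a middle-digit correction by a pure-arithmetic loop that peels off decimal digits with divmod and builds the reversed number directly, then adds it to n.
import Mathlib
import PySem

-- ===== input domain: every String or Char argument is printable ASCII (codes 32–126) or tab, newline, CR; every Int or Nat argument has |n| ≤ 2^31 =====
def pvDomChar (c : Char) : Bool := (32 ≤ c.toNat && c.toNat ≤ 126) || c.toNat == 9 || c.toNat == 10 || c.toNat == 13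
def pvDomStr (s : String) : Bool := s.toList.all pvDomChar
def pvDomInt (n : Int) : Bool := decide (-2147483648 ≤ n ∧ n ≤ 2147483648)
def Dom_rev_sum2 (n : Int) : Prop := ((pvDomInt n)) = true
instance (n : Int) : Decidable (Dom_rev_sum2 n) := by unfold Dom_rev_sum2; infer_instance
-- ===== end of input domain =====

-- B replaces A's string/pair-sum digit arithmetic by a plain divmod loop that builds the
-- reversed number directly and adds it to n (simpler: no string, no powers, no parity branch).

-- ===== PORT A =====
-- int(sn[k]) : one-char index + int() parse; the `.getD 0` default is never reached under
-- Pre_rev_sum2 (every index A uses is in range and every character is a decimal digit).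
def pyDigit (cs : List Char) (i : Int) : Int :=
  ((PySem.List.pyGet? cs i).bind (fun c => PySem.Int.ofChars? [c])).getD 0

-- literal port of A; exponents 10**k use k.toNat (every exponent A forms is ≥ 0)
def rev_sum2 (n : Int) : Int :=
  let sn : List Char := PySem.Int.toChars n
  let l : Int := (sn.length : Int) - 1
  let halfl : Int := PySem.Int.floordiv l 2
  let rsum : Int := (PySem.List.pyRange 0 (halfl + 1) 1).foldl
    (fun acc k => acc +
      (pyDigit sn k + pyDigit sn (l - k)) * ((10:Int) ^ k.toNat + (10:Int) ^ (l - k).toNat)) 0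
  let ex : Int := if PySem.Int.mod l 2 = 0 then 2 * pyDigit sn halfl * (10:Int) ^ halfl.toNat else 0
  rsum - ex

-- ===== PORT B =====
-- the `while m > 0: r = r*10 + m%10; m //= 10` loop of Source B
def revLoop (m r : Int) : Int :=
  if 0 < m then revLoop (PySem.Int.floordiv m 10) (r * 10 + PySem.Int.mod m 10) else r
termination_by m.toNat
decreasing_by
  rw [PySem.Int.floordiv_eq_ediv_of_pos (by norm_num)]
  omega

def rev_sum2_alt (n : Int) : Int := n + revLoop n 0

-- ===== PRECONDITION & SPEC =====
-- A raises ValueError for n < 0 (int('-') on the sign character of str(n)), so Pre_ is 0 ≤ n.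
def Pre_rev_sum2 (n : Int) : Prop := 0 ≤ n
instance (n : Int) : Decidable (Pre_rev_sum2 n) := by unfold Pre_rev_sum2; infer_instance
def pvWitness_rev_sum2 : Int := 123

def Spec_rev_sum2 (n : Int) (out : Int) : Prop := out = rev_sum2_alt n
instance (n : Int) (out : Int) : Decidable (Spec_rev_sum2 n out) := by unfold Spec_rev_sum2; infer_instance

-- ===== CLAIM (what is proved, stated in full; the proofs are below) =====
def Claim_equal_rev_sum2 : Prop := ∀ (n : Int), Dom_rev_sum2 n → Pre_rev_sum2 n → Spec_rev_sum2 n (rev_sum2 n)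

-- ===== LEMMAS AND PROOFS =====

-- big-endian decimal digit list of m (what str(m) spells), as numbers
def bigDigits (m : Nat) : List Nat := if m = 0 then [0] else (Nat.digits 10 m).reverse

theorem bigDigits_ne_nil (m : Nat) : bigDigits m ≠ [] := by
  unfold bigDigits
  split
  · simp
  · simp [Nat.digits_ne_nil_iff_ne_zero, *]

theorem bigDigits_lt (m d : Nat) (h : d ∈ bigDigits m) : d < 10 := by
  unfold bigDigits at h
  split at h
  · simp at h; omega
  · exact Nat.digits_lt_base (by norm_num) (List.mem_reverse.mp h)

theorem toDigits_eq_bigDigits (m : Nat) : Nat.toDigits 10 m = (bigDigits m).map Nat.digitChar := by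
  induction m using Nat.strong_induction_on with
  | _ m ih =>
    rcases Nat.eq_zero_or_pos m with h0 | hpos
    · subst h0; simp [bigDigits, Nat.toDigits_zero]; rfl
    · by_cases h10 : m < 10
      · rw [Nat.toDigits_of_lt_base h10]
        have : Nat.digits 10 m = [m] := by
          rw [Nat.digits_def' (by norm_num) hpos]
          have h1 : m / 10 = 0 := by omega
          have h2 : m % 10 = m := by omega
          simp [h1, h2]
        simp [bigDigits, Nat.pos_iff_ne_zero.mp hpos, this]
      · have hge : 10 ≤ m := by omega
        rw [Nat.toDigits_of_base_le (by norm_num) hge]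
        have hdiv : m / 10 < m := Nat.div_lt_self hpos (by norm_num)
        rw [ih (m / 10) hdiv]
        have hd0 : m / 10 ≠ 0 := by omega
        have : bigDigits m = bigDigits (m / 10) ++ [m % 10] := by
          unfold bigDigits
          rw [if_neg (by omega), if_neg hd0, Nat.digits_def' (by norm_num) hpos]
          simp
        rw [this]
        simp

theorem ofChars_digitChar (d : Nat) (hd : d < 10) :
    PySem.Int.ofChars? [Nat.digitChar d] = some (d : Int) := by
  interval_cases d <;> decide

theorem sum_map_range (n : Nat) (f : Nat → Int) :
    ((List.range n).map f).sum = ∑ i ∈ Finset.range n, f i := rfl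

theorem ofDigitsZ_cons (d : Nat) (t : List Nat) :
    Nat.ofDigits (10:Int) (d :: t) = (d : Int) + 10 * Nat.ofDigits (10:Int) t := rfl

theorem ofDigitsZ_append (l1 l2 : List Nat) :
    Nat.ofDigits (10:Int) (l1 ++ l2)
      = Nat.ofDigits (10:Int) l1 + 10 ^ l1.length * Nat.ofDigits (10:Int) l2 := by
  induction l1 with
  | nil => simp [Nat.ofDigits]
  | cons d t ih =>
    simp only [List.cons_append, ofDigitsZ_cons, ih, List.length_cons, pow_succ]
    ring

theorem sumLE (ds : List Nat) :
    Nat.ofDigits (10:Int) ds = ∑ k ∈ Finset.range ds.length, (ds.getD k 0 : Int) * 10 ^ k := by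
  induction ds with
  | nil => simp [Nat.ofDigits]
  | cons d t iht =>
    rw [ofDigitsZ_cons, iht]
    simp only [List.length_cons]
    rw [Finset.sum_range_succ']
    simp only [List.getD_cons_succ, List.getD_cons_zero, pow_zero, mul_one, pow_succ]
    have hms : ∑ x ∈ Finset.range t.length, (t.getD x 0 : Int) * (10 ^ x * 10)
        = 10 * ∑ k ∈ Finset.range t.length, (t.getD k 0 : Int) * 10 ^ k := by
      rw [Finset.mul_sum]
      exact Finset.sum_congr rfl (fun x _ => by ring)
    rw [hms]
    ring

theorem getD_reverse (ds : List Nat) (k : Nat) (hk : k < ds.length) :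
    ds.reverse.getD k 0 = ds.getD (ds.length - 1 - k) 0 := by
  rw [List.getD_eq_getElem?_getD, List.getD_eq_getElem?_getD, List.getElem?_reverse hk]

theorem sumBE (ds : List Nat) :
    Nat.ofDigits (10:Int) ds.reverse
      = ∑ k ∈ Finset.range ds.length, (ds.getD k 0 : Int) * 10 ^ (ds.length - 1 - k) := by
  rw [sumLE, List.length_reverse]
  rw [← Finset.sum_range_reflect (fun k => (ds.getD k 0 : Int) * 10 ^ (ds.length - 1 - k)) ds.length]
  apply Finset.sum_congr rfl
  intro k hk
  have hk' : k < ds.length := Finset.mem_range.mp hk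
  rw [getD_reverse ds k hk']
  have he : ds.length - 1 - (ds.length - 1 - k) = k := by omega
  rw [he]

theorem pairSum (F : Nat → Int) (lN h : Nat) (hc : lN = 2 * h ∨ lN = 2 * h + 1) :
    ∑ k ∈ Finset.range (h + 1), (F k + F (lN - k))
      = (∑ k ∈ Finset.range (lN + 1), F k) + (if lN % 2 = 0 then F h else 0) := by
  have hh : h ≤ lN := by omega
  rw [Finset.sum_add_distrib]
  have hrefl : ∑ k ∈ Finset.range (h + 1), F (lN - k) = ∑ j ∈ Finset.Ico (lN - h) (lN + 1), F j := by
    rw [Finset.sum_Ico_eq_sum_range]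
    have hlen : lN + 1 - (lN - h) = h + 1 := by omega
    rw [hlen]
    rw [← Finset.sum_range_reflect (fun j => F (lN - h + j)) (h + 1)]
    apply Finset.sum_congr rfl
    intro k hk
    have : k < h + 1 := Finset.mem_range.mp hk
    congr 1
    omega
  rw [hrefl]
  have hc2 := Finset.sum_Ico_consecutive F (Nat.zero_le (h + 1)) (show h + 1 ≤ lN + 1 by omega)
  rw [← Finset.range_eq_Ico] at hc2
  rcases hc with hc | hc
  · have hmod : lN % 2 = 0 := by omega
    rw [if_pos hmod]
    have h1 : lN - h = h := by omega
    rw [h1, Finset.sum_eq_sum_Ico_succ_bot (show h < lN + 1 by omega) F]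
    linarith [hc2]
  · have hmod : lN % 2 = 1 := by omega
    rw [hmod, if_neg (by omega : ¬ (1:Nat) = 0)]
    have h1 : lN - h = h + 1 := by omega
    rw [h1]
    linarith [hc2]

theorem revLoop_eq (m : Nat) (r : Int) :
    revLoop (m : Int) r
      = r * 10 ^ (Nat.digits 10 m).length + Nat.ofDigits (10:Int) (Nat.digits 10 m).reverse := by
  induction m using Nat.strong_induction_on generalizing r with
  | _ m ih =>
    rcases Nat.eq_zero_or_pos m with h0 | hpos
    · subst h0; rw [revLoop]; simp [Nat.ofDigits]
    · rw [revLoop, if_pos (by exact_mod_cast hpos)]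
      have hfd : PySem.Int.floordiv (m : Int) 10 = ((m / 10 : Nat) : Int) := by
        exact_mod_cast PySem.Int.floordiv_natCast m 10
      have hmd : PySem.Int.mod (m : Int) 10 = ((m % 10 : Nat) : Int) := by
        exact_mod_cast PySem.Int.mod_natCast m 10
      rw [hfd, hmd, ih (m / 10) (Nat.div_lt_self hpos (by norm_num))]
      rw [Nat.digits_def' (by norm_num : (1:Nat) < 10) hpos]
      simp only [List.reverse_cons, List.length_cons, List.length_reverse, ofDigitsZ_append, pow_succ]
      have hsing : Nat.ofDigits (10:Int) [m % 10] = ((m % 10 : Nat) : Int) := by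
        simp [Nat.ofDigits]
      rw [hsing]
      ring

theorem revLoop_eq_bigDigits (m : Nat) :
    revLoop (m : Int) 0 = Nat.ofDigits (10:Int) (bigDigits m) := by
  rw [revLoop_eq]
  rcases Nat.eq_zero_or_pos m with h0 | hpos
  · subst h0; simp [bigDigits, Nat.ofDigits]
  · unfold bigDigits
    rw [if_neg (by omega)]
    simp

theorem ofDigits_bigDigits_reverse (m : Nat) :
    Nat.ofDigits (10:Int) (bigDigits m).reverse = (m : Int) := by
  unfold bigDigits
  split
  · subst ‹m = 0›; simp [Nat.ofDigits]
  · rw [List.reverse_reverse]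
    have := Nat.coe_ofDigits Int 10 (Nat.digits 10 m)
    norm_num at this
    rw [← this, Nat.ofDigits_digits]

theorem main_eq (n : Int) (hn : 0 ≤ n) : rev_sum2 n = rev_sum2_alt n := by
  obtain ⟨m, rfl⟩ : ∃ m : Nat, n = (m : Int) := ⟨n.toNat, (Int.toNat_of_nonneg hn).symm⟩
  have hL1 : 1 ≤ (bigDigits m).length := List.length_pos_of_ne_nil (bigDigits_ne_nil m)
  set ds := bigDigits m with hds
  set L := ds.length with hLdef
  set lN := L - 1 with hlN
  set h := lN / 2 with hh
  have hhl : h ≤ lN := Nat.div_le_self _ _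
  have hcase : lN = 2 * h ∨ lN = 2 * h + 1 := by omega
  -- the characters A reads
  have hsn : PySem.Int.toChars (m : Int) = ds.map Nat.digitChar := by
    unfold PySem.Int.toChars
    rw [if_neg (by omega)]
    simpa using toDigits_eq_bigDigits m
  -- digit reads
  have hdig : ∀ k : Nat, k < L → pyDigit (ds.map Nat.digitChar) (k : Int) = ((ds.getD k 0 : Nat) : Int) := by
    intro k hk
    unfold pyDigit
    have hk' : k < (ds.map Nat.digitChar).length := by simpa using hk
    rw [PySem.List.pyGet?_natCast, List.getElem?_eq_getElem hk']
    simp only [List.getElem_map, Option.bind_some]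
    rw [List.getD_eq_getElem ds 0 hk] at *
    rw [ofChars_digitChar _ (bigDigits_lt m _ (List.getElem_mem hk))]
    rfl
  -- abbreviations for the two families of terms
  set F : Nat → Int := fun k => ((ds.getD k 0 : Nat) : Int) * 10 ^ (lN - k) with hF
  set G : Nat → Int := fun k => ((ds.getD k 0 : Nat) : Int) * 10 ^ k with hG
  show rev_sum2 (m : Int) = rev_sum2_alt (m : Int)
  unfold rev_sum2 rev_sum2_alt
  rw [hsn]
  simp only [List.length_map]
  have hlcast : (L : Int) - 1 = (lN : Int) := by omega
  rw [hlcast]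
  have hfd2 : PySem.Int.floordiv (lN : Int) 2 = (h : Int) := by
    exact_mod_cast PySem.Int.floordiv_natCast lN 2
  rw [hfd2]
  have hmod2 : PySem.Int.mod (lN : Int) 2 = ((lN % 2 : Nat) : Int) := by
    exact_mod_cast PySem.Int.mod_natCast lN 2
  rw [hmod2]
  -- the loop as a Finset sum
  rw [PySem.List.foldl_add]
  rw [PySem.List.pyRange_one]
  have hcnt : ((h : Int) + 1 - 0).toNat = h + 1 := by omega
  rw [hcnt, List.map_map, sum_map_range]
  have hterm : ∀ k ∈ Finset.range (h + 1),
      ((fun k2 : Int => (pyDigit (ds.map Nat.digitChar) k2 + pyDigit (ds.map Nat.digitChar) ((lN : Int) - k2))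
          * ((10:Int) ^ k2.toNat + (10:Int) ^ ((lN : Int) - k2).toNat)) ∘ (fun k1 : Nat => (0:Int) + (k1 : Int))) k
        = (F k + F (lN - k)) + (G k + G (lN - k)) := by
    intro k hkmem
    have hk : k ≤ lN := by
      have := Finset.mem_range.mp hkmem; omega
    have hkL : k < L := by omega
    have hkl : (lN : Int) - (k : Int) = ((lN - k : Nat) : Int) := by omega
    simp only [Function.comp_apply, zero_add]
    rw [hkl, hdig k hkL, hdig (lN - k) (by omega)]
    have ht1 : ((k : Int)).toNat = k := by omega
    have ht2 : (((lN - k : Nat) : Int)).toNat = lN - k := by omega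
    rw [ht1, ht2, hF, hG]
    have hexp : lN - (lN - k) = k := by omega
    simp only []
    rw [hexp]
    ring
  rw [Finset.sum_congr rfl hterm]
  rw [Finset.sum_add_distrib, pairSum F lN h hcase, pairSum G lN h hcase]
  -- the two full sums are n and the reversed number
  have hLsum : lN + 1 = L := by omega
  have hFsum : ∑ k ∈ Finset.range (lN + 1), F k = (m : Int) := by
    rw [hLsum, hF, ← sumBE, ofDigits_bigDigits_reverse]
  have hGsum : ∑ k ∈ Finset.range (lN + 1), G k = revLoop (m : Int) 0 := by
    rw [hLsum, hG, ← sumLE, revLoop_eq_bigDigits]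
  rw [hFsum, hGsum]
  -- parity case split
  rw [hdig h (by omega)]
  have ht3 : ((h : Int)).toNat = h := by omega
  rw [ht3]
  by_cases hpar : lN % 2 = 0
  · have hlh : lN - h = h := by omega
    simp only [hpar, Nat.cast_zero, reduceIte, hF, hG, hlh]
    ring
  · have h1 : lN % 2 = 1 := by omega
    simp only [h1, Nat.cast_one]
    norm_num

-- ===== VERDICT (by name: the statement is the Claim_ definition above) =====
theorem rev_sum2_spec : Claim_equal_rev_sum2 := by
  intro n _ hpre
  unfold Spec_rev_sum2
  exact main_eq n hpre
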